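-- pv_equiv track=rewrite | github.com/Nathan-Schwartz/dotfiles | scripts/generate-mocs.py | get_doc_type
-- ===== SOURCE A (Python) =====
-- def get_doc_type(filename):
--     """Get compound extension type from filename."""
--     for ext, dtype in (
--         (".ref.md", "ref"),
--         (".synth.md", "synth"),
--         (".temp.md", "temp"),
--     ):
--         if filename.endswith(ext):
--             return dtype
--     return None
-- ===== SOURCE B (Python) =====
-- def get_doc_type(filename):
--     """Get compound extension type from filename."""
--     parts = filename.split(".")
--     if len(parts) >= 3 and parts[-1] == "md" and parts[-2] in ("ref", "synth", "temp"):
--         return parts[-2]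
--     return None
-- ===== Notes on version B (the rewrite author's own statement) =====
-- stated objective: idiomatic
-- what changed: B splits the filename once on the dot separator and tests whether the last token is the markdown extension and the second-to-last token is one of the three doc-type names, instead of A's loop of endswith tests over compound-extension string literals.
import Mathlib
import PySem

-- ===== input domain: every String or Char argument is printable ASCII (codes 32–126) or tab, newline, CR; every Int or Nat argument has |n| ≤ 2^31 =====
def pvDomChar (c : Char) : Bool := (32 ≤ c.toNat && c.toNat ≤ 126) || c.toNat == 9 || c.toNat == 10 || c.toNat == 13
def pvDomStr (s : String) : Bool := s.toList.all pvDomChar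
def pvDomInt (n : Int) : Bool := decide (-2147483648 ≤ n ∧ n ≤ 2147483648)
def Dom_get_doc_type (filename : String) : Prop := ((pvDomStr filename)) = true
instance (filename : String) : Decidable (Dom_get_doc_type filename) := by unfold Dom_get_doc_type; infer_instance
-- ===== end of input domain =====

-- B replaces A's chain of endswith tests by one split on the dot separator plus a token comparison (idiomatic, same cost).

-- ===== PORT A =====
def get_doc_type (filename : String) : Option String :=
  if PySem.Str.endswith filename ".ref.md" then some "ref"
  else if PySem.Str.endswith filename ".synth.md" then some "synth"
  else if PySem.Str.endswith filename ".temp.md" then some "temp"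
  else none

-- ===== PORT B =====
def get_doc_type_alt (filename : String) : Option String :=
  let parts := PySem.Chars.splitOn filename.toList ".".toList
  if 3 ≤ parts.length then
    match PySem.List.pyGet? parts (-1), PySem.List.pyGet? parts (-2) with
    | some lastTok, some prevTok =>
        if lastTok = "md".toList ∧
            (prevTok = "ref".toList ∨ prevTok = "synth".toList ∨ prevTok = "temp".toList) then
          some (String.mk prevTok)
        else none
    | _, _ => none
  else none


-- ===== PRECONDITION & SPEC =====
def Spec_get_doc_type (filename : String) (out : Option String) : Prop := out = get_doc_type_alt filename
instance (filename : String) (out : Option String) : Decidable (Spec_get_doc_type filename out) := by unfold Spec_get_doc_type; infer_instance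

-- ===== CLAIM (what is proved, stated in full; the proofs are below) =====
def Claim_equal_get_doc_type : Prop := ∀ (filename : String), Dom_get_doc_type filename → Spec_get_doc_type filename (get_doc_type filename)

-- ===== LEMMAS AND PROOFS =====

-- mySplit is the proof-side model of PySem.Chars.splitOn with the single-dot separator
def mySplit : List Char → List (List Char)
  | [] => [[]]
  | c :: rest => if c = '.' then [] :: mySplit rest else (mySplit rest).modifyHead (fun h => c :: h)

theorem mySplit_ne_nil (cs : List Char) : mySplit cs ≠ [] := by
  induction cs with
  | nil => simp [mySplit]
  | cons c rest ih =>
    simp only [mySplit]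
    split
    · simp
    · cases h : mySplit rest with
      | nil => exact absurd h ih
      | cons a t => simp

theorem go_spec (fuel : Nat) : ∀ (l cur : List Char) (acc : List (List Char)), l.length ≤ fuel →
    PySem.Chars.splitOn.go ['.'] fuel l cur acc
      = acc.reverse ++ (mySplit l).modifyHead (fun h => cur.reverse ++ h) := by
  induction fuel with
  | zero =>
    intro l cur acc hl
    have : l = [] := by cases l <;> simp_all
    subst this
    simp [PySem.Chars.splitOn.go, mySplit]
  | succ f ih =>
    intro l cur acc hl
    cases l with
    | nil => simp [PySem.Chars.splitOn.go, mySplit]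
    | cons c rest =>
      by_cases hc : c = '.'
      · subst hc
        have hpre : List.isPrefixOf ['.'] ('.' :: rest) = true := by simp [List.isPrefixOf]
        rw [PySem.Chars.splitOn.go]
        simp only [hpre, if_pos, List.length_cons, List.drop_succ_cons, List.length_nil, List.drop_zero]
        rw [ih rest [] _ (by simp at hl; omega)]
        simp [mySplit]
        cases h : mySplit rest <;> simp
      · have hpre : List.isPrefixOf ['.'] (c :: rest) = false := by
          simp [List.isPrefixOf]; exact fun h => (hc h.symm).elim
        rw [PySem.Chars.splitOn.go]
        simp only [hpre]
        rw [if_neg (by simp)]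
        rw [ih rest (c :: cur) acc (by simpa using Nat.le_of_succ_le_succ hl)]
        simp only [mySplit, if_neg hc]
        cases h : mySplit rest with
        | nil => exact absurd h (mySplit_ne_nil rest)
        | cons a t => simp

theorem splitOn_dot (cs : List Char) : PySem.Chars.splitOn cs ['.'] = mySplit cs := by
  unfold PySem.Chars.splitOn
  rw [go_spec _ _ _ _ (by omega)]
  cases h : mySplit cs with
  | nil => exact absurd h (mySplit_ne_nil cs)
  | cons a t => simp

def joinDots : List (List Char) → List Char
  | [] => []
  | [x] => x
  | x :: y :: xs => x ++ '.' :: joinDots (y :: xs)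

theorem joinDots_modifyHead (c : Char) (q : List Char) (t : List (List Char)) :
    joinDots (List.modifyHead (fun h => c :: h) (q :: t)) = c :: joinDots (q :: t) := by
  cases t <;> simp [joinDots]

theorem joinDots_mySplit (cs : List Char) : joinDots (mySplit cs) = cs := by
  induction cs with
  | nil => simp [mySplit, joinDots]
  | cons c rest ih =>
    simp only [mySplit]
    by_cases hc : c = '.'
    · subst hc
      
      cases h : mySplit rest with
      | nil => exact absurd h (mySplit_ne_nil rest)
      | cons q t => rw [h] at ih; simp [joinDots, ih]
    · rw [if_neg hc]
      cases h : mySplit rest with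
      | nil => exact absurd h (mySplit_ne_nil rest)
      | cons q t => rw [h] at ih; rw [joinDots_modifyHead, ih]

theorem mySplit_append_dot (u v : List Char) :
    mySplit (u ++ '.' :: v) = mySplit u ++ mySplit v := by
  induction u with
  | nil => simp [mySplit]
  | cons c u' ih =>
    simp only [List.cons_append, mySplit, ih]
    by_cases hc : c = '.'
    · simp [hc]
    · rw [if_neg hc, if_neg hc]
      cases h : mySplit u' with
      | nil => exact absurd h (mySplit_ne_nil u')
      | cons q t => simp

theorem mySplit_dotfree (v : List Char) (hv : '.' ∉ v) : mySplit v = [v] := by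
  induction v with
  | nil => rfl
  | cons c v' ih =>
    simp only [List.mem_cons, not_or] at hv
    have hc : ¬ c = '.' := fun h => hv.1 h.symm
    simp [mySplit, hc, ih hv.2]

theorem pyGet_last_two {α : Type} (ys : List α) (a b : α) :
    PySem.List.pyGet? (ys ++ [a, b]) (-1) = some b ∧
    PySem.List.pyGet? (ys ++ [a, b]) (-2) = some a := by
  have hn : (ys ++ [a, b]).length = ys.length + 2 := by simp
  constructor
  · simp only [PySem.List.pyGet?, PySem.List.pyIdx?, hn]
    rw [if_neg (by omega), if_pos (by push_cast; omega)]
    have : (ys.length + 2) - (-(-1 : Int)).toNat = ys.length + 1 := by omega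
    simp [this]
  · simp only [PySem.List.pyGet?, PySem.List.pyIdx?, hn]
    rw [if_neg (by omega), if_pos (by push_cast; omega)]
    have : (ys.length + 2) - (-(-2 : Int)).toNat = ys.length := by omega
    simp [this]

theorem last_two_decomp {α : Type} (P : List α) (h : 2 ≤ P.length) :
    ∃ ys a b, P = ys ++ [a, b] := by
  rcases hP : P.reverse with _ | ⟨b, t⟩
  · rw [List.reverse_eq_nil_iff] at hP; subst hP; simp at h
  · rcases t with _ | ⟨a, r⟩
    · have h2 := congrArg List.reverse hP; simp at h2; subst h2; simp at h
    · refine ⟨r.reverse, a, b, ?_⟩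
      have h2 := congrArg List.reverse hP; simp at h2; simp [h2]

theorem joinDots_append2 (ys : List (List Char)) (a b : List Char) (h : ys ≠ []) :
    joinDots (ys ++ [a, b]) = joinDots ys ++ '.' :: (a ++ '.' :: b) := by
  induction ys with
  | nil => exact absurd rfl h
  | cons y ys' ih =>
    cases ys' with
    | nil => simp [joinDots]
    | cons z t =>
      have h2 := ih (by simp)
      calc joinDots (y :: z :: t ++ [a, b]) = y ++ '.' :: joinDots (z :: t ++ [a, b]) := by
              simp [joinDots]
        _ = y ++ '.' :: (joinDots (z :: t) ++ '.' :: (a ++ '.' :: b)) := by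
              rw [List.cons_append] at h2 ⊢; rw [h2]
        _ = joinDots (y :: z :: t) ++ '.' :: (a ++ '.' :: b) := by simp [joinDots]

theorem key_iff (cs tok m : List Char) (htok : '.' ∉ tok) (hm : '.' ∉ m) :
    ('.' :: (tok ++ '.' :: m)) <:+ cs ↔
      (3 ≤ (mySplit cs).length ∧ PySem.List.pyGet? (mySplit cs) (-1) = some m ∧
        PySem.List.pyGet? (mySplit cs) (-2) = some tok) := by
  constructor
  · rintro ⟨u, hu⟩
    have hcs : cs = (u ++ '.' :: tok) ++ '.' :: m := by rw [← hu]; simp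
    have hsplit : mySplit cs = (mySplit u ++ [tok]) ++ [m] := by
      rw [hcs, mySplit_append_dot, mySplit_dotfree m hm, mySplit_append_dot,
        mySplit_dotfree tok htok]
    have hlen : 1 ≤ (mySplit u).length := by
      cases h : mySplit u with
      | nil => exact absurd h (mySplit_ne_nil u)
      | cons x t => simp
    refine ⟨by simp [hsplit]; omega, ?_, ?_⟩
    · rw [hsplit, List.append_assoc]
      exact (pyGet_last_two (mySplit u) tok m).1
    · rw [hsplit, List.append_assoc]
      exact (pyGet_last_two (mySplit u) tok m).2
  · rintro ⟨hlen, h1, h2⟩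
    obtain ⟨ys, a, b, hP⟩ := last_two_decomp (mySplit cs) (by omega)
    have hb : b = m := by
      have := (pyGet_last_two ys a b).1
      rw [hP] at h1; rw [this] at h1; exact Option.some_inj.mp h1
    have ha : a = tok := by
      have := (pyGet_last_two ys a b).2
      rw [hP] at h2; rw [this] at h2; exact Option.some_inj.mp h2
    have hys : ys ≠ [] := by
      rw [hP] at hlen; simp at hlen; intro h; simp [h] at hlen
    have hcs : cs = joinDots ys ++ '.' :: (tok ++ '.' :: m) := by
      rw [← joinDots_mySplit cs, hP, ha, hb, joinDots_append2 ys tok m hys]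
    exact ⟨joinDots ys, hcs.symm⟩

theorem main_eq (filename : String) : get_doc_type filename = get_doc_type_alt filename := by
  have hdot : (".".toList : List Char) = ['.'] := by decide
  unfold get_doc_type get_doc_type_alt
  simp only [PySem.Str.endswith_eq, hdot, splitOn_dot]
  have Cref : (PySem.Chars.endswith filename.toList ".ref.md".toList = true) ↔
      (3 ≤ (mySplit filename.toList).length ∧
        PySem.List.pyGet? (mySplit filename.toList) (-1) = some "md".toList ∧
        PySem.List.pyGet? (mySplit filename.toList) (-2) = some "ref".toList) := by
    rw [PySem.Chars.endswith_iff,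
      show (".ref.md".toList : List Char) = '.' :: ("ref".toList ++ '.' :: "md".toList) by decide]
    exact key_iff filename.toList "ref".toList "md".toList (by decide) (by decide)
  have Csyn : (PySem.Chars.endswith filename.toList ".synth.md".toList = true) ↔
      (3 ≤ (mySplit filename.toList).length ∧
        PySem.List.pyGet? (mySplit filename.toList) (-1) = some "md".toList ∧
        PySem.List.pyGet? (mySplit filename.toList) (-2) = some "synth".toList) := by
    rw [PySem.Chars.endswith_iff,
      show (".synth.md".toList : List Char) = '.' :: ("synth".toList ++ '.' :: "md".toList) by decide]
    exact key_iff filename.toList "synth".toList "md".toList (by decide) (by decide)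
  have Ctem : (PySem.Chars.endswith filename.toList ".temp.md".toList = true) ↔
      (3 ≤ (mySplit filename.toList).length ∧
        PySem.List.pyGet? (mySplit filename.toList) (-1) = some "md".toList ∧
        PySem.List.pyGet? (mySplit filename.toList) (-2) = some "temp".toList) := by
    rw [PySem.Chars.endswith_iff,
      show (".temp.md".toList : List Char) = '.' :: ("temp".toList ++ '.' :: "md".toList) by decide]
    exact key_iff filename.toList "temp".toList "md".toList (by decide) (by decide)
  by_cases h3 : 3 ≤ (mySplit filename.toList).length
  · obtain ⟨ys, a, b, hdec⟩ := last_two_decomp (mySplit filename.toList) (by omega)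
    have g1 : PySem.List.pyGet? (mySplit filename.toList) (-1) = some b := by
      rw [hdec]; exact (pyGet_last_two ys a b).1
    have g2 : PySem.List.pyGet? (mySplit filename.toList) (-2) = some a := by
      rw [hdec]; exact (pyGet_last_two ys a b).2
    rw [if_pos h3, g1, g2]
    by_cases hmd : b = "md".toList
    · subst hmd
      by_cases ha1 : a = "ref".toList
      · subst ha1
        rw [if_pos (Cref.mpr ⟨h3, g1, g2⟩)]
        decide
      · have hr : ¬ (PySem.Chars.endswith filename.toList ".ref.md".toList = true) := by
          intro h
          have hx := (Cref.mp h).2.2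
          rw [g2] at hx
          exact ha1 (Option.some_inj.mp hx)
        by_cases ha2 : a = "synth".toList
        · subst ha2
          rw [if_neg hr, if_pos (Csyn.mpr ⟨h3, g1, g2⟩)]
          decide
        · have hs : ¬ (PySem.Chars.endswith filename.toList ".synth.md".toList = true) := by
            intro h
            have hx := (Csyn.mp h).2.2
            rw [g2] at hx
            exact ha2 (Option.some_inj.mp hx)
          by_cases ha3 : a = "temp".toList
          · subst ha3
            rw [if_neg hr, if_neg hs, if_pos (Ctem.mpr ⟨h3, g1, g2⟩)]
            decide
          · have ht : ¬ (PySem.Chars.endswith filename.toList ".temp.md".toList = true) := by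
              intro h
              have hx := (Ctem.mp h).2.2
              rw [g2] at hx
              exact ha3 (Option.some_inj.mp hx)
            rw [if_neg hr, if_neg hs, if_neg ht]
            simp only []
            rw [if_neg (fun h => h.2.elim ha1 (fun h2 => h2.elim ha2 ha3))]
    · have hbad : ∀ t : List Char,
          PySem.List.pyGet? (mySplit filename.toList) (-1) = some "md".toList → False := by
        intro t hx
        rw [g1] at hx
        exact hmd (Option.some_inj.mp hx)
      have hr : ¬ (PySem.Chars.endswith filename.toList ".ref.md".toList = true) :=
        fun h => hbad [] (Cref.mp h).2.1
      have hs : ¬ (PySem.Chars.endswith filename.toList ".synth.md".toList = true) :=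
        fun h => hbad [] (Csyn.mp h).2.1
      have ht : ¬ (PySem.Chars.endswith filename.toList ".temp.md".toList = true) :=
        fun h => hbad [] (Ctem.mp h).2.1
      rw [if_neg hr, if_neg hs, if_neg ht]
      simp only []
      rw [if_neg (fun h => hmd h.1)]
  · have hr : ¬ (PySem.Chars.endswith filename.toList ".ref.md".toList = true) :=
      fun h => h3 (Cref.mp h).1
    have hs : ¬ (PySem.Chars.endswith filename.toList ".synth.md".toList = true) :=
      fun h => h3 (Csyn.mp h).1
    have ht : ¬ (PySem.Chars.endswith filename.toList ".temp.md".toList = true) :=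
      fun h => h3 (Ctem.mp h).1
    rw [if_neg hr, if_neg hs, if_neg ht, if_neg h3]

-- ===== VERDICT (by name: the statement is the Claim_ definition above) =====
theorem get_doc_type_spec : Claim_equal_get_doc_type := by
  intro filename _
  unfold Spec_get_doc_type
  exact main_eq filename
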